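-- pv_equiv track=rewrite | github.com/JavierCastellD/InitiationCodonMutationPredictor | src/web/SeqUtils/seq_utils.py | get_mets_5_utr_info
-- ===== SOURCE A (Python) =====
-- CODON_LENGTH = 3
--
-- MET = 'ATG'
--
-- STOP_CODONS = ['TAG', 'TAA', 'TGA']
--
-- def get_mets_5_utr_info(cdna:str, cds:str) -> dict:
--     translation_start_pos = get_translation_start_pos(cdna, cds)
--     five_prime = cdna[0 : translation_start_pos]
--     met_positions = get_met_positions(five_prime)
--     nmets_5_utr = len(met_positions)
--     conserved_mets_in_5_utr = 0
--     lost_mets_un_5_utr = 0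
--     conserved_mets_no_stop_in_5_utr = 0
--     for i in range(0, len(met_positions)):
--         met_position = met_positions[i]
--         relative_met_position = met_position - len(five_prime)
--         if relative_met_position % 3 == 0:
--             conserved_mets_in_5_utr = conserved_mets_in_5_utr + 1
--             stop_codon_pos = get_stop_codon_position(five_prime, met_position)
--             if stop_codon_pos == -1:
--                 conserved_mets_no_stop_in_5_utr = conserved_mets_no_stop_in_5_utr + 1
--         else:
--             lost_mets_un_5_utr = lost_mets_un_5_utr + 1
--
--     mets_5_utr_info = {
--         'NMETS_5_UTR': nmets_5_utr,
--         'CONSERVED_METS_IN_5_UTR': conserved_mets_in_5_utr,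
--         'LOST_METS_IN_5_UTR': lost_mets_un_5_utr,
--         'CONSERVED_METS_NO_STOP_IN_5_UTR': conserved_mets_no_stop_in_5_utr
--     }
--     return mets_5_utr_info
--
-- def get_translation_start_pos(cdna:str, cds:str) -> int:
--     return cdna.find(cds)
--
-- def get_stop_codon_position(cdna:str, translation_start_pos:int) -> int:
--     if translation_start_pos != -1:
--         for i in range(translation_start_pos, len(cdna), CODON_LENGTH):
--             codon =  cdna[i : i + CODON_LENGTH]
--             if codon in STOP_CODONS:
--                 return i
--     return -1
--
-- def is_met(seq:str, pos:int) -> bool: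
--     return seq[pos:pos+3] == MET
--
-- def get_met_positions(seq:str) -> list:
--     positions = []
--     if seq is not None:
--         for i in range(0, len(seq)-2):
--             if is_met(seq, i):
--                 positions.append(i)
--     return positions
-- ===== SOURCE B (Python) =====
-- CODON_LENGTH = 3
-- MET = 'ATG'
-- STOP_CODONS = ['TAG', 'TAA', 'TGA']
--
-- def get_mets_5_utr_info(cdna: str, cds: str) -> dict:
--     five_prime = cdna[0 : cdna.find(cds)]
--     L = len(five_prime)
--     # total mets: one forward pass
--     nmets = 0
--     for i in range(L - 2):
--         if five_prime[i:i+3] == MET: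
--             nmets += 1
--     # conserved frame (positions ≡ L mod 3): one BACKWARD pass carrying
--     # a "stop codon seen downstream" flag — no per-met rescan.
--     conserved = 0
--     no_stop = 0
--     stop_ahead = False
--     for p in range(L - 3, -1, -3):
--         codon = five_prime[p:p+3]
--         if codon == MET:
--             conserved += 1
--             if not stop_ahead:
--                 no_stop += 1
--         if codon in STOP_CODONS:
--             stop_ahead = True
--     return {
--         'NMETS_5_UTR': nmets,
--         'CONSERVED_METS_IN_5_UTR': conserved,
--         'LOST_METS_IN_5_UTR': nmets - conserved,
--         'CONSERVED_METS_NO_STOP_IN_5_UTR': no_stop,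
--     }
-- ===== Notes on version B (the rewrite author's own statement) =====
-- stated objective: alternative
-- what changed: A rescans forward from every conserved-frame ATG to look for a downstream stop codon; B instead makes one forward pass counting ATGs and one backward pass over the conserved-frame codon positions carrying a 'stop seen downstream' flag, so no per-met rescan is performed.
import Mathlib
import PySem

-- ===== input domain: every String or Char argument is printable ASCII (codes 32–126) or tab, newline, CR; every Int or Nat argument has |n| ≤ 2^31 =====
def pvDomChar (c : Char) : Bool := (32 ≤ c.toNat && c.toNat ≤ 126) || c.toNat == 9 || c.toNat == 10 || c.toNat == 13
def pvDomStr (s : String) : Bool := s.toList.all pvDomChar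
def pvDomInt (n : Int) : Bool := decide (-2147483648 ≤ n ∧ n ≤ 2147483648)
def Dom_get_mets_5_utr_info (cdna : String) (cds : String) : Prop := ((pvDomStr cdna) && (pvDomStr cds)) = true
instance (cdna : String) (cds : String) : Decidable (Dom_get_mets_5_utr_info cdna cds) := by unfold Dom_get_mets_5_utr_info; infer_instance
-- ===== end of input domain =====

-- B replaces A's per-met rescan for a downstream stop codon by a single backward
-- sweep over the conserved frame carrying a "stop seen downstream" flag.

def pvMet : List Char := ['A', 'T', 'G']

def pvStops : List (List Char) := [['T','A','G'], ['T','A','A'], ['T','G','A']]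

-- ===== PORT A =====
-- codon = seq[i : i+3]
def pvCodon (seq : List Char) (i : Int) : List Char :=
  PySem.List.slice seq (some i) (some (i + 3))

-- is_met(seq, pos)
def pvIsMet (seq : List Char) (pos : Int) : Bool := pvCodon seq pos == pvMet

-- get_met_positions(seq)
def pvMetPositions (seq : List Char) : List Int :=
  (PySem.List.pyRange 0 (PySem.List.len seq - 2)).foldl
    (fun acc i => if pvIsMet seq i then acc ++ [i] else acc) []

-- the 'for i in range(tsp, len(cdna), 3): if codon in STOP_CODONS: return i' loop
def pvFindStop (cdna : List Char) : List Int → Int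
  | [] => -1
  | i :: rest => if pvStops.contains (pvCodon cdna i) then i else pvFindStop cdna rest

-- get_stop_codon_position(cdna, tsp)
def pvStopCodonPos (cdna : List Char) (tsp : Int) : Int :=
  if tsp ≠ -1 then pvFindStop cdna (PySem.List.pyRange tsp (PySem.List.len cdna) 3) else -1

-- the body of A's main loop: state (conserved, lost, conserved_no_stop), met position p
def pvALoopBody (fp : List Char) (st : Int × Int × Int) (p : Int) : Int × Int × Int :=
  if PySem.Int.mod (p - PySem.List.len fp) 3 = 0 then
    if pvStopCodonPos fp p = -1 then (st.1 + 1, st.2.1, st.2.2 + 1)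
    else (st.1 + 1, st.2.1, st.2.2)
  else (st.1, st.2.1 + 1, st.2.2)

def get_mets_5_utr_info (cdna : String) (cds : String) : List (String × Int) :=
  let translation_start_pos := PySem.Str.find cdna cds
  let five_prime := PySem.List.slice cdna.toList (some 0) (some translation_start_pos)
  let met_positions := pvMetPositions five_prime
  let nmets : Int := PySem.List.len met_positions
  let st := (PySem.List.pyRange 0 (PySem.List.len met_positions)).foldl
    (fun st i => pvALoopBody five_prime st (PySem.List.pyGetD met_positions i 0))
    (0, 0, 0)
  [("NMETS_5_UTR", nmets),
   ("CONSERVED_METS_IN_5_UTR", st.1),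
   ("LOST_METS_IN_5_UTR", st.2.1),
   ("CONSERVED_METS_NO_STOP_IN_5_UTR", st.2.2)]

-- ===== PORT B =====
-- the body of B's backward sweep: state (conserved, no_stop, stop_ahead), frame position p
def pvBLoopBody (fp : List Char) (st : Int × Int × Bool) (p : Int) : Int × Int × Bool :=
  let codon := PySem.List.slice fp (some p) (some (p + 3))
  let st1 := if codon == pvMet then
      (st.1 + 1, (if st.2.2 then st.2.1 else st.2.1 + 1), st.2.2)
    else st
  if pvStops.contains codon then (st1.1, st1.2.1, true) else st1

def get_mets_5_utr_info_alt (cdna : String) (cds : String) : List (String × Int) :=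
  let five_prime := PySem.List.slice cdna.toList (some 0) (some (PySem.Str.find cdna cds))
  let L := PySem.List.len five_prime
  let nmets := (PySem.List.pyRange 0 (L - 2)).foldl
    (fun n i => if PySem.List.slice five_prime (some i) (some (i + 3)) == pvMet then n + 1 else n)
    (0 : Int)
  let st := (PySem.List.pyRange (L - 3) (-1) (-3)).foldl (pvBLoopBody five_prime) (0, 0, false)
  [("NMETS_5_UTR", nmets),
   ("CONSERVED_METS_IN_5_UTR", st.1),
   ("LOST_METS_IN_5_UTR", nmets - st.1),
   ("CONSERVED_METS_NO_STOP_IN_5_UTR", st.2.1)]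

-- ===== PRECONDITION & SPEC =====
def Spec_get_mets_5_utr_info (cdna : String) (cds : String) (out : List (String × Int)) : Prop := out = get_mets_5_utr_info_alt cdna cds
instance (cdna : String) (cds : String) (out : List (String × Int)) : Decidable (Spec_get_mets_5_utr_info cdna cds out) := by unfold Spec_get_mets_5_utr_info; infer_instance

-- ===== CLAIM (what is proved, stated in full; the proofs are below) =====
def Claim_equal_get_mets_5_utr_info : Prop := ∀ (cdna : String) (cds : String), Dom_get_mets_5_utr_info cdna cds → Spec_get_mets_5_utr_info cdna cds (get_mets_5_utr_info cdna cds)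

-- ===== LEMMAS AND PROOFS =====

-- "is a stop codon at position p" (the test both loops make)
def pvIsStop (fp : List Char) (p : Int) : Bool := pvStops.contains (pvCodon fp p)

-- "conserved frame" test of A's loop
def pvPc (fp : List Char) (p : Int) : Bool := decide (PySem.Int.mod (p - PySem.List.len fp) 3 = 0)

-- the descending conserved-frame position list B iterates over, in explicit form
def pvD (fp : List Char) : List Int :=
  (List.range (fp.length / 3)).map (fun k : Nat => (fp.length : Int) - 3 - 3 * (k : Int))

lemma pv_met_not_stop (fp : List Char) (p : Int) (h : pvIsMet fp p = true) :
    pvIsStop fp p = false := by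
  simp only [pvIsMet, beq_iff_eq] at h
  simp only [pvIsStop]
  rw [h]
  decide

lemma pv_stop_len (s : List Char) (h : pvStops.contains s = true) : s.length = 3 := by
  simp only [pvStops, List.contains_eq_mem, List.mem_cons, List.not_mem_nil, or_false,
    decide_eq_true_eq] at h
  rcases h with h | h | h <;> subst h <;> rfl

lemma pv_not_stop_of_short (fp : List Char) (i : Int) (h0 : 0 ≤ i)
    (h : (fp.length : Int) - 3 < i) : pvIsStop fp i = false := by
  by_contra hc
  have hc' : pvStops.contains (pvCodon fp i) = true := by
    simpa [pvIsStop] using hc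
  have hlen := pv_stop_len _ hc'
  have hshort : (pvCodon fp i).length < 3 := by
    have hneg : ¬ i < 0 := by omega
    have hneg3 : ¬ i + 3 < 0 := by omega
    simp only [pvCodon, PySem.List.slice, PySem.List.clampIdx, hneg, hneg3, if_false,
      List.length_take, List.length_drop]
    omega
  omega

-- A's appending met-position loop is a filter
lemma pv_metPositions_eq (seq : List Char) :
    pvMetPositions seq =
      (PySem.List.pyRange 0 (PySem.List.len seq - 2)).filter (pvIsMet seq) := by
  simpa using PySem.List.foldl_append_if (pvIsMet seq) (fun x => x)
    (PySem.List.pyRange 0 (PySem.List.len seq - 2)) []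

-- A's main loop computes three counts
lemma pv_A_fold (fp : List Char) (l : List Int) (a b c : Int) :
    l.foldl (pvALoopBody fp) (a, b, c) =
      (a + List.countP (pvPc fp) l,
       b + List.countP (fun p => !pvPc fp p) l,
       c + List.countP (fun p => pvPc fp p && decide (pvStopCodonPos fp p = -1)) l) := by
  induction l generalizing a b c with
  | nil => simp
  | cons x l ih =>
    rw [List.foldl_cons]
    by_cases h1 : PySem.Int.mod (x - PySem.List.len fp) 3 = 0
    · have hdvd : (3 : Int) ∣ (x - (fp.length : Int)) := by
        have h' := (PySem.Int.mod_eq_zero_iff_dvd (x - PySem.List.len fp) 3).mp h1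
        simpa [PySem.List.len] using h'
      have hb : pvPc fp x = true := by simp [pvPc, PySem.List.len, hdvd]
      by_cases h2 : pvStopCodonPos fp x = -1
      · rw [show pvALoopBody fp (a, b, c) x = (a + 1, b, c + 1) from by
          simp [pvALoopBody, PySem.List.len, hdvd, h2]]
        rw [ih]
        simp [List.countP_cons, hb, h2, Prod.ext_iff]
        omega
      · rw [show pvALoopBody fp (a, b, c) x = (a + 1, b, c) from by
          simp [pvALoopBody, PySem.List.len, hdvd, h2]]
        rw [ih]
        simp [List.countP_cons, hb, h2, Prod.ext_iff]
        omega
    · have hdvd : ¬ (3 : Int) ∣ (x - (fp.length : Int)) := by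
        rw [← PySem.Int.mod_eq_zero_iff_dvd]
        simpa [PySem.List.len] using h1
      have hb : pvPc fp x = false := by simp [pvPc, PySem.List.len, hdvd]
      rw [show pvALoopBody fp (a, b, c) x = (a, b + 1, c) from by
        simp [pvALoopBody, PySem.List.len, hdvd]]
      rw [ih]
      simp [List.countP_cons, hb, Prod.ext_iff]
      omega

-- B's backward sweep: conserved count, no-stop count via takeWhile, stop flag
lemma pv_B_fold (fp : List Char) (l : List Int) (c n : Int) (sa : Bool) :
    l.foldl (pvBLoopBody fp) (c, n, sa) =
      (c + List.countP (pvIsMet fp) l,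
       n + (if sa then 0
            else (List.countP (pvIsMet fp) (l.takeWhile (fun p => !pvIsStop fp p)) : Int)),
       sa || l.any (pvIsStop fp)) := by
  induction l generalizing c n sa with
  | nil => simp
  | cons x l ih =>
    rw [List.foldl_cons]
    by_cases hs : pvIsStop fp x = true
    · have hm : pvIsMet fp x = false := by
        cases hmb : pvIsMet fp x
        · rfl
        · rw [pv_met_not_stop fp x hmb] at hs; simp at hs
      have hm'' : (PySem.List.slice fp (some x) (some (x + 3)) == pvMet) = false := by
        simpa [pvIsMet, pvCodon] using hm
      have hsm : PySem.List.slice fp (some x) (some (x + 3)) ∈ pvStops := by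
        have h' := hs
        simp only [pvIsStop, pvCodon, List.contains_eq_mem, decide_eq_true_eq] at h'
        exact h'
      have hstep : pvBLoopBody fp (c, n, sa) x = (c, n, true) := by
        simp [pvBLoopBody, hm'', hsm]
      rw [hstep, ih]
      have htw : List.takeWhile (fun p => !pvIsStop fp p) (x :: l) = [] := by
        rw [List.takeWhile_cons, if_neg (by simp [hs])]
      rw [htw]
      simp [List.countP_cons, hm, hs]
    · have hs' : pvIsStop fp x = false := by simpa using hs
      have hsm : PySem.List.slice fp (some x) (some (x + 3)) ∉ pvStops := by
        have h' := hs'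
        simp only [pvIsStop, pvCodon, List.contains_eq_mem, decide_eq_false_iff_not] at h'
        exact h'
      have htw : List.takeWhile (fun p => !pvIsStop fp p) (x :: l)
          = x :: List.takeWhile (fun p => !pvIsStop fp p) l := by
        rw [List.takeWhile_cons, if_pos (by simp [hs'])]
      by_cases hmb : pvIsMet fp x = true
      · have hm'' : (PySem.List.slice fp (some x) (some (x + 3)) == pvMet) = true := by
          simpa [pvIsMet, pvCodon] using hmb
        have hstep : pvBLoopBody fp (c, n, sa) x
            = (c + 1, if sa then n else n + 1, sa) := by
          simp [pvBLoopBody, hm'', hsm]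
        rw [hstep, ih, htw]
        cases sa <;> simp [List.countP_cons, hmb, hs'] <;> omega
      · have hm : pvIsMet fp x = false := by simpa using hmb
        have hm'' : (PySem.List.slice fp (some x) (some (x + 3)) == pvMet) = false := by
          simpa [pvIsMet, pvCodon] using hm
        have hstep : pvBLoopBody fp (c, n, sa) x = (c, n, sa) := by
          simp [pvBLoopBody, hm'', hsm]
        rw [hstep, ih, htw]
        simp [List.countP_cons, hm, hs']

-- A's stop search returns -1 exactly when no scanned codon is a stop
lemma pv_findStop_eq_neg_one (fp : List Char) (l : List Int) (h : ∀ i ∈ l, 0 ≤ i) :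
    pvFindStop fp l = -1 ↔ ∀ i ∈ l, pvIsStop fp i = false := by
  induction l with
  | nil => simp [pvFindStop]
  | cons x l ih =>
    simp only [pvFindStop]
    by_cases hx : pvStops.contains (pvCodon fp x) = true
    · have hx0 : 0 ≤ x := h x (by simp)
      rw [if_pos hx]
      constructor
      · intro hh; omega
      · intro hh
        have := hh x (by simp)
        simp only [pvIsStop] at this
        rw [this] at hx; simp at hx
    · have hx' : pvStops.contains (pvCodon fp x) = false := by simpa using hx
      rw [if_neg hx]
      rw [ih (fun i hi => h i (by simp [hi]))]
      constructor
      · intro hh i hi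
        rcases List.mem_cons.mp hi with rfl | hi
        · simpa [pvIsStop] using hx'
        · exact hh i hi
      · intro hh i hi; exact hh i (by simp [hi])

-- counting mets before the first stop in a strictly descending list
lemma pv_countP_takeWhile (fp : List Char) (l : List Int) (hl : l.Pairwise (· > ·)) :
    List.countP (pvIsMet fp) (l.takeWhile (fun p => !pvIsStop fp p)) =
      List.countP
        (fun p => pvIsMet fp p && decide (∀ q ∈ l, p ≤ q → pvIsStop fp q = false)) l := by
  induction l with
  | nil => simp
  | cons x l ih =>
    rcases List.pairwise_cons.mp hl with ⟨hx, hl'⟩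
    by_cases hs : pvIsStop fp x = true
    · rw [List.takeWhile_cons, if_neg (by simp [hs])]
      symm
      rw [List.countP_nil, List.countP_eq_zero]
      intro p hp
      rcases List.mem_cons.mp hp with rfl | hp
      · simp only [Bool.and_eq_true, decide_eq_true_eq, not_and]
        intro _ hall
        have := hall p (by simp) le_rfl
        rw [this] at hs; simp at hs
      · have hlt : p < x := hx p hp
        simp only [Bool.and_eq_true, decide_eq_true_eq, not_and]
        intro _ hall
        have := hall x (by simp) (by omega)
        rw [this] at hs; simp at hs
    · have hs' : pvIsStop fp x = false := by simpa using hs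
      rw [List.takeWhile_cons, if_pos (by simp [hs'])]
      rw [List.countP_cons, List.countP_cons, ih hl']
      have hxcond : (∀ q ∈ x :: l, x ≤ q → pvIsStop fp q = false) := by
        intro q hq hle
        rcases List.mem_cons.mp hq with rfl | hq
        · exact hs'
        · exact absurd hle (by have := hx q hq; omega)
      have hx1 : (pvIsMet fp x && decide (∀ q ∈ x :: l, x ≤ q → pvIsStop fp q = false))
          = pvIsMet fp x := by
        rw [decide_eq_true hxcond, Bool.and_true]
      rw [hx1]
      have hcongr : List.countP
          (fun p => pvIsMet fp p && decide (∀ q ∈ l, p ≤ q → pvIsStop fp q = false)) l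
          = List.countP
          (fun p => pvIsMet fp p && decide (∀ q ∈ x :: l, p ≤ q → pvIsStop fp q = false)) l := by
        apply List.countP_congr
        intro p _
        have hcond : (∀ q ∈ l, p ≤ q → pvIsStop fp q = false)
            ↔ (∀ q ∈ x :: l, p ≤ q → pvIsStop fp q = false) := by
          constructor
          · intro hh q hq hle
            rcases List.mem_cons.mp hq with rfl | hq
            · exact hs'
            · exact hh q hq hle
          · intro hh q hq hle; exact hh q (by simp [hq]) hle
        rw [decide_eq_decide.mpr hcond]
      rw [hcongr]

-- two maps over ranges agree when lengths and functions agree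
lemma pv_map_range_eq {f g : Nat → Int} {m n : Nat} (hmn : m = n)
    (hfg : ∀ k, f k = g k) : (List.range m).map f = (List.range n).map g := by
  subst hmn
  exact List.map_congr_left (fun k _ => hfg k)

-- the negative-step range B iterates over, in explicit form
lemma pv_D_eq (fp : List Char) :
    PySem.List.pyRange ((fp.length : Int) - 3) (-1) (-3) = pvD fp := by
  simp only [PySem.List.pyRange, pvD]
  rw [if_neg (show ¬ (-3 : Int) = 0 by norm_num)]
  apply pv_map_range_eq
  · split_ifs <;> (try simp only [neg_neg]) <;> omega
  · intro k; push_cast; ring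

-- the step-1 range both met scans use, in explicit form
lemma pv_asc_eq (L : Nat) :
    PySem.List.pyRange 0 ((L : Int) - 2) = (List.range (L - 2)).map (fun k : Nat => (k : Int)) := by
  rw [PySem.List.pyRange_of_pos 0 ((L : Int) - 2) (by norm_num)]
  apply pv_map_range_eq
  · split_ifs <;> omega
  · intro k; push_cast; ring

lemma pv_D_pairwise (fp : List Char) : (pvD fp).Pairwise (· > ·) := by
  unfold pvD
  rw [List.pairwise_map]
  refine List.pairwise_lt_range.imp ?_
  intro a b h
  dsimp only
  omega

lemma pv_D_nodup (fp : List Char) : (pvD fp).Nodup := by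
  unfold pvD
  apply List.Nodup.map _ List.nodup_range
  intro a b h
  dsimp only at h
  omega

-- the two filtered lists of conserved met positions are permutations
lemma pv_perm (fp : List Char) :
    (((List.range (fp.length - 2)).map (fun k : Nat => (k : Int))).filter
        (fun p => pvPc fp p && pvIsMet fp p)).Perm
      ((pvD fp).filter (pvIsMet fp)) := by
  rw [List.perm_ext_iff_of_nodup]
  · intro a
    simp only [List.mem_filter, List.mem_map, List.mem_range, pvD, pvPc, PySem.List.len,
      Bool.and_eq_true, decide_eq_true_eq, PySem.Int.mod_eq_zero_iff_dvd]
    constructor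
    · rintro ⟨⟨k, hk, rfl⟩, hdvd, hmet⟩
      exact ⟨⟨(fp.length - 3 - k) / 3, by omega, by push_cast; omega⟩, hmet⟩
    · rintro ⟨⟨k, hk, rfl⟩, hmet⟩
      exact ⟨⟨fp.length - 3 - 3 * k, by omega, by push_cast; omega⟩, by push_cast; omega, hmet⟩
  · exact List.Nodup.filter _ (List.Nodup.map (fun a b h => by omega) List.nodup_range)
  · exact List.Nodup.filter _ (pv_D_nodup fp)

-- A's stop search from a frame position = "no stop at any frame position ≥ p"
lemma pv_stop_char (fp : List Char) (p : Int) (hp : p ∈ pvD fp) :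
    pvStopCodonPos fp p = -1 ↔ ∀ q ∈ pvD fp, p ≤ q → pvIsStop fp q = false := by
  simp only [pvD, List.mem_map, List.mem_range] at hp
  obtain ⟨k, hk, rfl⟩ := hp
  have hL3 : 3 * k + 3 ≤ fp.length := by omega
  unfold pvStopCodonPos
  rw [if_pos (show ((fp.length : Int) - 3 - 3 * (k : Int)) ≠ -1 by omega)]
  have hmem : ∀ i ∈ PySem.List.pyRange ((fp.length : Int) - 3 - 3 * (k : Int))
      (PySem.List.len fp) 3, 0 ≤ i := by
    intro i hi
    rw [PySem.List.mem_pyRange_iff_of_pos (by norm_num)] at hi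
    omega
  rw [pv_findStop_eq_neg_one fp _ hmem]
  constructor
  · intro hh q hq hle
    simp only [pvD, List.mem_map, List.mem_range] at hq
    obtain ⟨k', hk', rfl⟩ := hq
    apply hh
    rw [PySem.List.mem_pyRange_iff_of_pos (by norm_num), PySem.List.len]
    refine ⟨hle, by omega, by omega⟩
  · intro hh i hi
    rw [PySem.List.mem_pyRange_iff_of_pos (by norm_num), PySem.List.len] at hi
    obtain ⟨h1, h2, h3⟩ := hi
    by_cases hsmall : i ≤ (fp.length : Int) - 3
    · apply hh
      · simp only [pvD, List.mem_map, List.mem_range]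
        exact ⟨(fp.length - 3 - i.toNat) / 3, by omega, by push_cast; omega⟩
      · exact h1
    · exact pv_not_stop_of_short fp i (by omega) (by omega)

-- countP of a predicate and its negation sum to the length
lemma pv_countP_add_not {α : Type} (p : α → Bool) (l : List α) :
    List.countP p l + List.countP (fun x => !p x) l = l.length := by
  induction l with
  | nil => simp
  | cons x l ih =>
    simp only [List.countP_cons, List.length_cons]
    cases hx : p x <;> simp [hx] <;> omega

-- ===== VERDICT (by name: the statement is the Claim_ definition above) =====
theorem get_mets_5_utr_info_spec : Claim_equal_get_mets_5_utr_info := by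
  intro cdna cds _
  unfold Spec_get_mets_5_utr_info
  simp only [get_mets_5_utr_info, get_mets_5_utr_info_alt]
  rw [PySem.List.foldl_pyRange_pyGetD _ 0 _ _ le_rfl]
  simp only [Int.toNat_zero, List.drop_zero]
  set fp := PySem.List.slice cdna.toList (some 0) (some (PySem.Str.find cdna cds))
  rw [pv_metPositions_eq fp]
  simp only [PySem.List.len]
  rw [pv_asc_eq fp.length, pv_D_eq fp]
  rw [PySem.List.foldl_count_if
    (fun i => PySem.List.slice fp (some i) (some (i + 3)) == pvMet)]
  rw [show (fun i => PySem.List.slice fp (some i) (some (i + 3)) == pvMet) = pvIsMet fp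
    from rfl]
  rw [pv_A_fold, pv_B_fold]
  dsimp only
  set asc := (List.range (fp.length - 2)).map (fun k : Nat => (k : Int)) with hasc
  set mets := asc.filter (pvIsMet fp) with hmets
  have h_nm : mets.length = List.countP (pvIsMet fp) asc := by
    rw [hmets, ← List.countP_eq_length_filter]
  have h_cons : List.countP (pvPc fp) mets = List.countP (pvIsMet fp) (pvD fp) := by
    rw [hmets, List.countP_filter, List.countP_eq_length_filter, List.countP_eq_length_filter]
    exact (pv_perm fp).length_eq
  have h_nostop :
      List.countP (fun p => pvPc fp p && decide (pvStopCodonPos fp p = -1)) mets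
        = List.countP (pvIsMet fp) ((pvD fp).takeWhile (fun p => !pvIsStop fp p)) := by
    rw [pv_countP_takeWhile fp _ (pv_D_pairwise fp)]
    rw [hmets, List.countP_filter]
    have e1 : List.countP
        (fun a => (pvPc fp a && decide (pvStopCodonPos fp a = -1)) && pvIsMet fp a) asc
        = List.countP
        (fun a => decide (pvStopCodonPos fp a = -1) && (pvPc fp a && pvIsMet fp a)) asc := by
      apply List.countP_congr
      intro p _
      simp only [Bool.and_eq_true]
      tauto
    rw [e1, ← List.countP_filter, List.Perm.countP_eq _ (pv_perm fp), List.countP_filter]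
    apply List.countP_congr
    intro p hp
    have hchar := pv_stop_char fp p hp
    simp only [Bool.and_eq_true, decide_eq_true_eq]
    constructor
    · rintro ⟨hstop, hmet⟩
      exact ⟨hmet, hchar.mp hstop⟩
    · rintro ⟨hmet, hall⟩
      exact ⟨hchar.mpr hall, hmet⟩
  have h_tot := pv_countP_add_not (pvPc fp) mets
  simp only [Bool.false_eq_true, if_false, zero_add, List.cons.injEq, Prod.mk.injEq,
    and_true, true_and]
  refine ⟨by omega, by omega, by omega, by omega⟩
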